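-- pv_equiv track=rewrite | github.com/haolunc/ARC-RL | reference_solutions/solutions/47c1f68c.py | transform
-- ===== SOURCE A (Python) =====
-- def transform(grid):
--
--     n = len(grid)
--     if n == 0:
--         return []
--
--     k = n // 2
--     C = grid[k][k]
--
--     out_size = 2 * k
--
--     out = [[0 for _ in range(out_size)] for _ in range(out_size)]
--
--     for i in range(k):
--         for j in range(k):
--             if grid[i][j] != 0:
--
--                 out[i][j] = C
--                 out[i][out_size - 1 - j] = C
--                 out[out_size - 1 - i][j] = C
--                 out[out_size - 1 - i][out_size - 1 - j] = C
--     return out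
-- ===== SOURCE B (Python) =====
-- def transform(grid):
--     n = len(grid)
--     if n == 0:
--         return []
--     k = n // 2
--     C = grid[k][k]
--     out_size = 2 * k
--     return [[C if grid[i if i < k else out_size - 1 - i][j if j < k else out_size - 1 - j] != 0 else 0
--              for j in range(out_size)]
--             for i in range(out_size)]
-- ===== Notes on version B (the rewrite author's own statement) =====
-- stated objective: alternative
-- what changed: B gathers: each output cell pulls its value from the folded quadrant source index, instead of A's scatter that allocates a zero grid and writes four mirrored cells per nonzero source cell.
import Mathlib
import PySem

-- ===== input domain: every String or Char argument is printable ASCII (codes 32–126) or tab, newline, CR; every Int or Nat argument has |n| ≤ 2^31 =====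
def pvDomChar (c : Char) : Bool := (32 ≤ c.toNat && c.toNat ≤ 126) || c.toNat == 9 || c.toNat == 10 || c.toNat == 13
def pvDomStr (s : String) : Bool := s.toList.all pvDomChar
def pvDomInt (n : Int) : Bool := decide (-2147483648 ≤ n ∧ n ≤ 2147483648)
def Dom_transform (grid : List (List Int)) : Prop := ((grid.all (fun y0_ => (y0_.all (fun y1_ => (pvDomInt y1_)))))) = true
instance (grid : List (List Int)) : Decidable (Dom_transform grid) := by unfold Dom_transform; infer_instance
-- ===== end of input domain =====

-- B re-implements A as a gather (each output cell pulls from its folded quadrant source)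
-- instead of A's scatter (four mirrored writes per nonzero quadrant cell); same cost, different decomposition.

-- ===== PORT A =====
-- grid[a][b] (indices known nonnegative in A's loops); total read, in range under Pre_transform
def pvCell (grid : List (List Int)) (a b : Nat) : Int := (grid.getD a []).getD b 0

-- out[p][q] = v
def pvSetCell (out : List (List Int)) (p q : Nat) (v : Int) : List (List Int) :=
  out.modify p (fun row => row.set q v)

def transform (grid : List (List Int)) : List (List Int) :=
  let n := grid.length
  if n = 0 then []
  else
    let k := n / 2
    let C := pvCell grid k k
    let m := 2 * k
    let out0 := List.replicate m (List.replicate m (0 : Int))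
    (List.range k).foldl (fun out i =>
      (List.range k).foldl (fun out j =>
        if pvCell grid i j ≠ 0 then
          pvSetCell (pvSetCell (pvSetCell (pvSetCell out i j C) i (m - 1 - j) C)
            (m - 1 - i) j C) (m - 1 - i) (m - 1 - j) C
        else out) out) out0

-- ===== PORT B =====
def transform_alt (grid : List (List Int)) : List (List Int) :=
  let n := grid.length
  if n = 0 then []
  else
    let k := n / 2
    let C := pvCell grid k k
    let m := 2 * k
    (List.range m).map (fun i =>
      (List.range m).map (fun j =>
        if pvCell grid (if i < k then i else m - 1 - i) (if j < k then j else m - 1 - j) ≠ 0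
        then C else 0))

-- ===== PRECONDITION & SPEC =====
-- Exactly where the Python A returns: row k must reach past index k and every row i < k must
-- have length at least k, else A raises IndexError.
def Pre_transform (grid : List (List Int)) : Prop :=
  grid = [] ∨
    (grid.length / 2 < (grid.getD (grid.length / 2) []).length ∧
     ∀ i, i < grid.length / 2 → grid.length / 2 ≤ (grid.getD i []).length)
instance (grid : List (List Int)) : Decidable (Pre_transform grid) := by
  unfold Pre_transform; infer_instance
def pvWitness_transform : List (List Int) := [[1, 0, 2], [0, 3, 0], [4, 0, 5]]
def Spec_transform (grid : List (List Int)) (out : List (List Int)) : Prop := out = transform_alt grid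
instance (grid : List (List Int)) (out : List (List Int)) : Decidable (Spec_transform grid out) := by unfold Spec_transform; infer_instance

-- ===== CLAIM (what is proved, stated in full; the proofs are below) =====
def Claim_equal_transform : Prop := ∀ (grid : List (List Int)), Dom_transform grid → Pre_transform grid → Spec_transform grid (transform grid)

-- ===== LEMMAS AND PROOFS =====

-- shape: out is an m×m grid
def pvShape (m : Nat) (out : List (List Int)) : Prop :=
  out.length = m ∧ ∀ i, i < m → (out.getD i []).length = m

theorem pvShape_set {m : Nat} {out : List (List Int)} (h : pvShape m out)
    (p q : Nat) (v : Int) : pvShape m (pvSetCell out p q v) := by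
  obtain ⟨h1, h2⟩ := h
  refine ⟨by simp [pvSetCell, h1], fun i hi => ?_⟩
  simp only [pvSetCell, List.getD_eq_getElem?_getD, List.getElem?_modify]
  rcases hl : out[i]? with _ | row
  · simp at hl; omega
  · have := h2 i hi
    simp [List.getD_eq_getElem?_getD, hl] at this
    by_cases hp : p = i <;> simp [hp, this]

theorem pvCell_set {m : Nat} {out : List (List Int)} (h : pvShape m out)
    {p q i j : Nat} (_hp : p < m) (hq : q < m) (hi : i < m) (hj : j < m) (v : Int) :
    pvCell (pvSetCell out p q v) i j = if i = p ∧ j = q then v else pvCell out i j := by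
  obtain ⟨h1, h2⟩ := h
  rcases hri : out[i]? with _ | ri
  · simp at hri; omega
  have hril : ri.length = m := by
    have := h2 i hi; simpa [List.getD_eq_getElem?_getD, hri] using this
  simp only [pvCell, pvSetCell, List.getD_eq_getElem?_getD, List.getElem?_modify, hri,
    Option.map_eq_map, Option.map_some, Option.getD_some]
  by_cases hip : p = i
  · subst hip
    simp only [if_true, true_and, List.getElem?_set]
    by_cases hjq : j = q
    · subst hjq
      have hjr : j < ri.length := by omega
      simp [hjr]
    · rw [if_neg (fun h : q = j => hjq h.symm), if_neg hjq]
  · simp only [if_neg hip]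
    rw [if_neg (fun h : i = p ∧ j = q => hip h.1.symm)]

-- one scatter body application, characterised
theorem pvStep_char (grid : List (List Int)) (k m : Nat) (C : Int) (hm : m = 2 * k)
    {out : List (List Int)} (h : pvShape m out) {a b i j : Nat}
    (ha : a < k) (hb : b < k) (hi : i < m) (hj : j < m) :
    pvCell (if pvCell grid a b ≠ 0 then
        pvSetCell (pvSetCell (pvSetCell (pvSetCell out a b C) a (m - 1 - b) C)
          (m - 1 - a) b C) (m - 1 - a) (m - 1 - b) C
      else out) i j
      = if pvCell grid a b ≠ 0 ∧ (i = a ∨ i = m - 1 - a) ∧ (j = b ∨ j = m - 1 - b)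
        then C else pvCell out i j := by
  have ham : a < m := by omega
  have hbm : b < m := by omega
  have ham' : m - 1 - a < m := by omega
  have hbm' : m - 1 - b < m := by omega
  by_cases hz : pvCell grid a b ≠ 0
  · have s1 := pvShape_set h a b C
    have s2 := pvShape_set s1 a (m - 1 - b) C
    have s3 := pvShape_set s2 (m - 1 - a) b C
    rw [if_pos hz,
      pvCell_set s3 ham' hbm' hi hj, pvCell_set s2 ham' hbm hi hj,
      pvCell_set s1 ham hbm' hi hj, pvCell_set h ham hbm hi hj]
    by_cases e1 : i = a <;> by_cases e2 : i = m - 1 - a <;>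
      by_cases e3 : j = b <;> by_cases e4 : j = m - 1 - b <;>
      simp_all
  · simp only [if_neg hz]
    have hn : ¬ (pvCell grid a b ≠ 0 ∧ (i = a ∨ i = m - 1 - a) ∧ (j = b ∨ j = m - 1 - b)) := by
      tauto
    rw [if_neg hn]

theorem pvStep_shape (grid : List (List Int)) (m : Nat) (C : Int)
    {out : List (List Int)} (h : pvShape m out) (a b : Nat) :
    pvShape m (if pvCell grid a b ≠ 0 then
        pvSetCell (pvSetCell (pvSetCell (pvSetCell out a b C) a (m - 1 - b) C)
          (m - 1 - a) b C) (m - 1 - a) (m - 1 - b) C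
      else out) := by
  split
  · exact pvShape_set (pvShape_set (pvShape_set (pvShape_set h _ _ _) _ _ _) _ _ _) _ _ _
  · exact h

-- fold over any list of quadrant sources, characterised
theorem pvFold_char (grid : List (List Int)) (k m : Nat) (C : Int) (hm : m = 2 * k)
    (L : List (Nat × Nat)) (hL : ∀ p ∈ L, p.1 < k ∧ p.2 < k) :
    ∀ out, pvShape m out →
      pvShape m (L.foldl (fun out p =>
          if pvCell grid p.1 p.2 ≠ 0 then
            pvSetCell (pvSetCell (pvSetCell (pvSetCell out p.1 p.2 C) p.1 (m - 1 - p.2) C)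
              (m - 1 - p.1) p.2 C) (m - 1 - p.1) (m - 1 - p.2) C
          else out) out) ∧
      ∀ i j, i < m → j < m →
        pvCell (L.foldl (fun out p =>
          if pvCell grid p.1 p.2 ≠ 0 then
            pvSetCell (pvSetCell (pvSetCell (pvSetCell out p.1 p.2 C) p.1 (m - 1 - p.2) C)
              (m - 1 - p.1) p.2 C) (m - 1 - p.1) (m - 1 - p.2) C
          else out) out) i j
        = if ∃ p ∈ L, pvCell grid p.1 p.2 ≠ 0 ∧ (i = p.1 ∨ i = m - 1 - p.1) ∧
              (j = p.2 ∨ j = m - 1 - p.2)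
          then C else pvCell out i j := by
  induction L with
  | nil => intro out h; exact ⟨h, by simp⟩
  | cons p L ih =>
    intro out h
    have hp := hL p (List.mem_cons_self ..)
    have hL' : ∀ q ∈ L, q.1 < k ∧ q.2 < k := fun q hq => hL q (List.mem_cons_of_mem _ hq)
    have hstep := pvStep_shape grid m C h p.1 p.2
    obtain ⟨ihS, ihC⟩ := ih hL' _ hstep
    refine ⟨ihS, fun i j hi hj => ?_⟩
    simp only [List.foldl_cons]
    rw [ihC i j hi hj, pvStep_char grid k m C hm h hp.1 hp.2 hi hj]
    by_cases h1 : ∃ q ∈ L, pvCell grid q.1 q.2 ≠ 0 ∧ (i = q.1 ∨ i = m - 1 - q.1) ∧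
        (j = q.2 ∨ j = m - 1 - q.2) <;>
      by_cases h2 : pvCell grid p.1 p.2 ≠ 0 ∧ (i = p.1 ∨ i = m - 1 - p.1) ∧
        (j = p.2 ∨ j = m - 1 - p.2) <;>
      simp [h1, h2]

-- the existential over the full quadrant product collapses to the folded source cell
theorem pvExists_iff (grid : List (List Int)) (k m : Nat) (hm : m = 2 * k)
    {i j : Nat} (hi : i < m) (hj : j < m) :
    (∃ p ∈ (List.range k).flatMap (fun a => (List.range k).map (Prod.mk a)),
        pvCell grid p.1 p.2 ≠ 0 ∧ (i = p.1 ∨ i = m - 1 - p.1) ∧ (j = p.2 ∨ j = m - 1 - p.2))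
      ↔ pvCell grid (if i < k then i else m - 1 - i) (if j < k then j else m - 1 - j) ≠ 0 := by
  constructor
  · rintro ⟨⟨a, b⟩, hmem, hz, hti, htj⟩
    simp only [List.mem_flatMap, List.mem_map, List.mem_range] at hmem
    obtain ⟨a', ha', hb⟩ := hmem
    obtain ⟨b', hb', heq⟩ := hb
    have hab : a' = a ∧ b' = b := by
      refine ⟨congrArg Prod.fst heq, congrArg Prod.snd heq⟩
    obtain ⟨rfl, rfl⟩ := hab
    have hfi : (if i < k then i else m - 1 - i) = a' := by
      dsimp only at hti; split <;> omega
    have hfj : (if j < k then j else m - 1 - j) = b' := by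
      dsimp only at htj; split <;> omega
    rwa [hfi, hfj]
  · intro hz
    refine ⟨(if i < k then i else m - 1 - i, if j < k then j else m - 1 - j), ?_, hz, ?_, ?_⟩
    · simp only [List.mem_flatMap, List.mem_map, List.mem_range]
      exact ⟨_, by split <;> omega, _, by split <;> omega, rfl⟩
    · dsimp only; split <;> [left; right] <;> omega
    · dsimp only; split <;> [left; right] <;> omega

theorem transform_eq_alt (grid : List (List Int)) : transform grid = transform_alt grid := by
  by_cases hn : grid.length = 0
  · simp [transform, transform_alt, hn]
  · rw [transform, transform_alt]
    simp only [if_neg hn]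
    set k := grid.length / 2 with hk
    set C := pvCell grid k k with hC
    set m := 2 * k with hm
    have hshape0 : pvShape m (List.replicate m (List.replicate m (0 : Int))) := by
      constructor
      · simp
      · intro i hi
        simp [List.getD_eq_getElem?_getD, hi]
    have hnested :
        (List.range k).foldl (fun out i =>
          (List.range k).foldl (fun out j =>
            if pvCell grid i j ≠ 0 then
              pvSetCell (pvSetCell (pvSetCell (pvSetCell out i j C) i (m - 1 - j) C)
                (m - 1 - i) j C) (m - 1 - i) (m - 1 - j) C
            else out) out) (List.replicate m (List.replicate m (0 : Int)))
        = ((List.range k).flatMap (fun a => (List.range k).map (Prod.mk a))).foldl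
            (fun out (p : Nat × Nat) =>
              if pvCell grid p.1 p.2 ≠ 0 then
                pvSetCell (pvSetCell (pvSetCell (pvSetCell out p.1 p.2 C) p.1 (m - 1 - p.2) C)
                  (m - 1 - p.1) p.2 C) (m - 1 - p.1) (m - 1 - p.2) C
              else out) (List.replicate m (List.replicate m (0 : Int))) := by
      rw [List.foldl_flatMap]
      simp only [List.foldl_map]
    rw [hnested]
    have hL : ∀ p ∈ (List.range k).flatMap (fun a => (List.range k).map (Prod.mk a)),
        p.1 < k ∧ p.2 < k := by
      intro p hp
      simp only [List.mem_flatMap, List.mem_map, List.mem_range] at hp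
      obtain ⟨a, ha, b, hb, rfl⟩ := hp
      exact ⟨ha, hb⟩
    obtain ⟨⟨hlen, hrow⟩, hcell⟩ :=
      pvFold_char grid k m C hm _ hL (List.replicate m (List.replicate m (0 : Int))) hshape0
    set R := ((List.range k).flatMap (fun a => (List.range k).map (Prod.mk a))).foldl
      (fun out (p : Nat × Nat) =>
        if pvCell grid p.1 p.2 ≠ 0 then
          pvSetCell (pvSetCell (pvSetCell (pvSetCell out p.1 p.2 C) p.1 (m - 1 - p.2) C)
            (m - 1 - p.1) p.2 C) (m - 1 - p.1) (m - 1 - p.2) C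
        else out) (List.replicate m (List.replicate m (0 : Int))) with hR
    apply List.ext_getElem
    · simp [hlen]
    · intro i hi hi'
      have him : i < m := by rwa [hlen] at hi
      have hRrow : (R.getD i []).length = m := hrow i him
      have hRi : R.getD i [] = R[i] := by
        simp [List.getD_eq_getElem?_getD, List.getElem?_eq_getElem hi]
      apply List.ext_getElem
      · rw [← hRi, hRrow]; simp
      · intro j hj hj'
        have hjm : j < m := by rw [← hRi, hRrow] at hj; exact hj
        have hcz : pvCell (List.replicate m (List.replicate m (0 : Int))) i j = 0 := by
          simp [pvCell, List.getD_eq_getElem?_getD, him, hjm]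
        have := hcell i j him hjm
        simp only [pvExists_iff grid k m hm him hjm, hcz] at this
        have hRij : R[i][j] = pvCell R i j := by
          rw [pvCell, hRi, List.getD_eq_getElem?_getD, List.getElem?_eq_getElem hj,
            Option.getD_some]
        rw [hRij, this]
        simp

-- ===== VERDICT (by name: the statement is the Claim_ definition above) =====
theorem transform_spec : Claim_equal_transform := by
  intro grid _ _
  unfold Spec_transform
  exact transform_eq_alt grid
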